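-- pv_equiv track=rewrite | github.com/KC-software-en/QuizMe | Education/utils.py | get_next_question_id
-- ===== SOURCE A (Python) =====
-- def get_next_question_id(category_name, question_id, question_selection_pks):
--     # iterate over the list of question ids in question_selection_ids from utils.category_objects()
--     # - to check if the id generated by django matches the question_id parameter in the url
--     # - & display the specific question that matches the question_id in the URL
--     # question_pk refers to the automatically generated primary key (id) of each question in question_selection,
--     # and question_id is the identifier passed in the URL
--     # use enumerate to give each question in the selection an idx
--     for i, question_pk in enumerate(question_selection_pks, start=1):
--         if question_pk == question_id:
--            # save i to a variable. previously it wasn't being preserved properly for the last question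
--            # - giving an idx out of range error
--            # so use the variable instead of i to index the next pk
--            # previously i represented the index of the current iteration in the conditional with len,
--            # - which may be different from the desired index for the next question's primary key
--            next_idx_for_pk = i
--
--            # return the next question if its idx is less than / equal to the length of question_selection
--            if next_idx_for_pk < len(question_selection_pks):
--                return question_selection_pks[next_idx_for_pk]
--            else:
--                return None
-- ===== SOURCE B (Python) =====
-- def get_next_question_id(category_name, question_id, question_selection_pks):
--     # Stage 1: build a successor index (id -> the id following its FIRST occurrence).
--     # Walk the list right-to-left carrying the previously seen element, so that
--     # earlier pairs overwrite later ones and the first occurrence wins.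
--     successor = {}
--     following = None
--     for pk in reversed(question_selection_pks):
--         if following is not None:
--             successor[pk] = following
--         following = pk
--     # Stage 2: a single dictionary lookup.
--     return successor.get(question_id)
-- ===== Notes on version B (the rewrite author's own statement) =====
-- stated objective: alternative
-- what changed: Replaces A's forward enumerate loop with bounds-checked re-indexing by a two-stage algorithm: a right-to-left pass builds a successor dictionary (first occurrence wins by overwrite), then the answer is one dict lookup; no indices or length checks remain.
import Mathlib
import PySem

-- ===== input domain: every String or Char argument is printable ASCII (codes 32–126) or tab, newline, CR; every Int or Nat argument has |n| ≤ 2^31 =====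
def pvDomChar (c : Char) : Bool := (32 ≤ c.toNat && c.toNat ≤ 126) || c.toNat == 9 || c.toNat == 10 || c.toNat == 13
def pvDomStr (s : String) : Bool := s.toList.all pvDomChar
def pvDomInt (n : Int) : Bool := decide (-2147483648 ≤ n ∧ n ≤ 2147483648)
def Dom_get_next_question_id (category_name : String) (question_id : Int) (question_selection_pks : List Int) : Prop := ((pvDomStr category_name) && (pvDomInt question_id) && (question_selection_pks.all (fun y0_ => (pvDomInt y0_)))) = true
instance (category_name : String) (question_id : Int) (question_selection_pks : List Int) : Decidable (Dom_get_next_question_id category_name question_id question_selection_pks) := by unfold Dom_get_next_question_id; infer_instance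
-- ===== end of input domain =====

-- B replaces A's forward enumerate loop with bounds-checked re-indexing by a two-stage
-- algorithm: a right-to-left pass builds a successor dictionary (first occurrence wins
-- by overwrite), then the answer is a single dict lookup. Return value only, no mutation.

-- ===== PORT A =====
-- the for-loop over enumerate(pks, start=1): i is the 1-based index of the current element
def pvA_go (question_id : Int) (pks : List Int) (i : Nat) (cur : List Int) : Option Int :=
  match cur with
  | [] => none
  | pk :: rest =>
    if pk == question_id then
      -- next_idx_for_pk = i;  if next_idx_for_pk < len(pks): return pks[next_idx_for_pk] else: return None
      if (i : Int) < (pks.length : Int) then PySem.List.pyGet? pks (i : Int) else none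
    else pvA_go question_id pks (i + 1) rest

def get_next_question_id (category_name : String) (question_id : Int) (question_selection_pks : List Int) : Option Int :=
  pvA_go question_id question_selection_pks 1 question_selection_pks

-- ===== PORT B =====
-- loop body: for pk in reversed(pks): if following is not None: successor[pk] = following; following = pk
def pvB_step (st : PySem.Dict Int Int × Option Int) (pk : Int) : PySem.Dict Int Int × Option Int :=
  ((match st.2 with
    | some following => st.1.insert pk following
    | none => st.1), some pk)

def get_next_question_id_alt (category_name : String) (question_id : Int) (question_selection_pks : List Int) : Option Int :=
  -- stage 1: build the successor dict over the reversed list; stage 2: successor.get(question_id)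
  (question_selection_pks.reverse.foldl pvB_step (PySem.Dict.empty, none)).1.get? question_id

-- ===== PRECONDITION & SPEC =====
def Spec_get_next_question_id (category_name : String) (question_id : Int) (question_selection_pks : List Int) (out : Option Int) : Prop := out = get_next_question_id_alt category_name question_id question_selection_pks
instance (category_name : String) (question_id : Int) (question_selection_pks : List Int) (out : Option Int) : Decidable (Spec_get_next_question_id category_name question_id question_selection_pks out) := by unfold Spec_get_next_question_id; infer_instance

-- ===== CLAIM (what is proved, stated in full; the proofs are below) =====
def Claim_equal_get_next_question_id : Prop := ∀ (category_name : String) (question_id : Int) (question_selection_pks : List Int), Dom_get_next_question_id category_name question_id question_selection_pks → Spec_get_next_question_id category_name question_id question_selection_pks (get_next_question_id category_name question_id question_selection_pks)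

-- ===== LEMMAS AND PROOFS =====
-- common reference function: the id after the first occurrence of q (none at the last slot / not found)
def nextAfter (q : Int) : List Int → Option Int
  | [] => none
  | x :: rest => if x == q then rest.head? else nextAfter q rest

theorem pvA_go_eq_nextAfter (question_id : Int) :
    ∀ (cur pre : List Int),
      pvA_go question_id (pre ++ cur) (pre.length + 1) cur = nextAfter question_id cur := by
  intro cur
  induction cur with
  | nil => intro pre; simp [pvA_go, nextAfter]
  | cons pk rest ih =>
    intro pre
    by_cases hpk : pk = question_id
    · cases rest with
      | nil => simp [pvA_go, nextAfter, hpk]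
      | cons b rest' =>
        subst hpk
        simp only [pvA_go, nextAfter, beq_self_eq_true, if_true]
        have hlen : ((pre.length + 1 : Nat) : Int) < (((pre ++ pk :: b :: rest').length : Nat) : Int) := by
          simp
        have hget1 : PySem.List.pyGet? (pre ++ pk :: b :: rest') ((pre.length + 1 : Nat) : Int)
            = some b := by
          have h := PySem.List.pyGet?_append_right (pre := pre) (ys := pk :: b :: rest') (k := 1)
          simpa using h
        rw [if_pos hlen, hget1]
        simp
    · have hstep : pvA_go question_id (pre ++ pk :: rest) (pre.length + 1) (pk :: rest)
          = pvA_go question_id (pre ++ pk :: rest) (pre.length + 2) rest := by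
        simp [pvA_go, hpk]
      have hrw : pre ++ pk :: rest = (pre ++ [pk]) ++ rest := by simp
      have := ih (pre ++ [pk])
      simp only [List.length_append, List.length_cons, List.length_nil] at this
      rw [hstep, hrw, this]
      simp [nextAfter, hpk]

-- the carried 'following' after the (reversed) fold has processed l is l.head?
theorem pvB_foldr_snd (l : List Int) (d : PySem.Dict Int Int) :
    (l.foldr (fun x st => pvB_step st x) (d, none)).2 = l.head? := by
  cases l with
  | nil => rfl
  | cons x rest => simp [pvB_step]

theorem pvB_foldr_get (q : Int) (l : List Int) :
    ((l.foldr (fun x st => pvB_step st x) (PySem.Dict.empty, (none : Option Int))).1).get? q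
      = nextAfter q l := by
  induction l with
  | nil => simp [nextAfter, PySem.Dict.get?_empty]
  | cons x rest ih =>
    simp only [List.foldr_cons]
    cases rest with
    | nil => simp [pvB_step, nextAfter, PySem.Dict.get?_empty]
    | cons b rest' =>
      have hsnd : ((b :: rest').foldr (fun x st => pvB_step st x) (PySem.Dict.empty, (none : Option Int))).2
          = some b := by rw [pvB_foldr_snd]; rfl
      have hstep : pvB_step ((b :: rest').foldr (fun x st => pvB_step st x) (PySem.Dict.empty, (none : Option Int))) x
          = (((b :: rest').foldr (fun x st => pvB_step st x) (PySem.Dict.empty, (none : Option Int))).1.insert x b, some x) := by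
        rw [pvB_step, hsnd]
      show ((pvB_step ((b :: rest').foldr (fun x st => pvB_step st x) (PySem.Dict.empty, (none : Option Int))) x).1).get? q = _
      rw [hstep]
      simp only
      rw [PySem.Dict.get?_insert]
      by_cases hq : q = x
      · subst hq; simp [nextAfter]
      · simp only [if_neg hq, ih, nextAfter]
        have hbx : (x == q) = false := by simp [Ne.symm hq]
        simp [hbx]

-- ===== VERDICT (by name: the statement is the Claim_ definition above) =====
theorem get_next_question_id_spec : Claim_equal_get_next_question_id := by
  intro category_name question_id pks _
  unfold Spec_get_next_question_id get_next_question_id get_next_question_id_alt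
  rw [List.foldl_reverse, pvB_foldr_get]
  have := pvA_go_eq_nextAfter question_id pks []
  simpa using this
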